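-- pv_equiv track=rewrite | github.com/sloganhmc/CodeEval | grid_walk.py | check_new_coordinate
-- ===== SOURCE A (Python) =====
-- def check_new_coordinate(in_coor, max_val):
--     xval = str(abs(in_coor[0]));
--     yval = str(abs(in_coor[1]));
--
--     count = 0
--     for char in xval:
--         count+=int(char)
--     for char in yval:
--         count+=int(char)
--
--     if(count<=max_val):
--         return(True)
--     else:
--         return(False)
-- ===== SOURCE B (Python) =====
-- def check_new_coordinate(in_coor, max_val):
--     count = 0
--     for n in (abs(in_coor[0]), abs(in_coor[1])):
--         while n >= 10:
--             count += n % 10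
--             n //= 10
--         count += n
--     return count <= max_val
-- ===== Notes on version B (the rewrite author's own statement) =====
-- stated objective: simpler
-- what changed: B extracts digits arithmetically with % 10 and //= 10 instead of converting each coordinate to a string and re-parsing every character with int(), and returns the comparison directly instead of an if/else over True/False.
import Mathlib
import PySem

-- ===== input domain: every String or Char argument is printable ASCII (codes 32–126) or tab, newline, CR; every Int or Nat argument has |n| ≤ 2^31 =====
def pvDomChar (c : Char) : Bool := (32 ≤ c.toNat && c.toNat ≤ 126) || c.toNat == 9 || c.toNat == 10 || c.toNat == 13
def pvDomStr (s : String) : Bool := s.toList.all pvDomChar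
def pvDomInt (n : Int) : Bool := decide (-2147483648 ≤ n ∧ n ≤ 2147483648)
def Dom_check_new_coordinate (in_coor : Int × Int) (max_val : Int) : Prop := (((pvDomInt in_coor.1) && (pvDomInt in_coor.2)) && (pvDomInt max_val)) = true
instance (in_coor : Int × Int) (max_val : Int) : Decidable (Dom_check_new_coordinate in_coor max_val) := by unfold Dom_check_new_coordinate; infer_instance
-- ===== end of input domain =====

-- B replaces the string conversion + per-character int() parsing of A by arithmetic
-- digit extraction (% 10, //= 10); objective: simpler. Equal return value everywhere.

-- ===== PORT A =====
-- int(char): exact here, since every char iterated over is a decimal digit of str(abs(...))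
def pvChrInt (c : Char) : Int := (PySem.Int.ofChars? [c]).getD 0

def check_new_coordinate (in_coor : Int × Int) (max_val : Int) : Bool :=
  let xval := PySem.Int.toStr |in_coor.1|
  let yval := PySem.Int.toStr |in_coor.2|
  let count : Int := 0
  let count := xval.toList.foldl (fun acc ch => acc + pvChrInt ch) count
  let count := yval.toList.foldl (fun acc ch => acc + pvChrInt ch) count
  if count ≤ max_val then true else false

-- ===== PORT B =====
-- the inner 'while n >= 10: count += n % 10; n //= 10' followed by 'count += n'
def pvDigitLoop (n : Nat) (count : Int) : Int :=
  if n ≥ 10 then pvDigitLoop (n / 10) (count + (n : Int) % 10) else count + (n : Int)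

def check_new_coordinate_alt (in_coor : Int × Int) (max_val : Int) : Bool :=
  let count : Int := 0
  let count := pvDigitLoop in_coor.1.natAbs count
  let count := pvDigitLoop in_coor.2.natAbs count
  decide (count ≤ max_val)

-- ===== PRECONDITION & SPEC =====
def Spec_check_new_coordinate (in_coor : Int × Int) (max_val : Int) (out : Bool) : Prop := out = check_new_coordinate_alt in_coor max_val
instance (in_coor : Int × Int) (max_val : Int) (out : Bool) : Decidable (Spec_check_new_coordinate in_coor max_val out) := by unfold Spec_check_new_coordinate; infer_instance

-- ===== CLAIM (what is proved, stated in full; the proofs are below) =====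
def Claim_equal_check_new_coordinate : Prop := ∀ (in_coor : Int × Int) (max_val : Int), Dom_check_new_coordinate in_coor max_val → Spec_check_new_coordinate in_coor max_val (check_new_coordinate in_coor max_val)

-- ===== LEMMAS AND PROOFS =====

theorem pvChrInt_digitChar (d : Nat) (hd : d < 10) :
    pvChrInt d.digitChar = (d : Int) := by
  interval_cases d <;> decide

theorem pvDigitLoop_add (n : Nat) (c d : Int) :
    pvDigitLoop n (c + d) = pvDigitLoop n c + d := by
  induction n using Nat.strong_induction_on generalizing c with
  | _ n ih =>
    by_cases h : n ≥ 10
    · rw [pvDigitLoop, if_pos h]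
      conv_rhs => rw [pvDigitLoop, if_pos h]
      rw [show c + d + (n : Int) % 10 = (c + (n : Int) % 10) + d by ring]
      exact ih (n / 10) (Nat.div_lt_self (by omega) (by omega)) _
    · rw [pvDigitLoop, if_neg h]
      conv_rhs => rw [pvDigitLoop, if_neg h]
      ring

theorem foldl_toDigits (n : Nat) (c : Int) :
    (Nat.toDigits 10 n).foldl (fun acc ch => acc + pvChrInt ch) c = pvDigitLoop n c := by
  induction n using Nat.strong_induction_on generalizing c with
  | _ n ih =>
    by_cases h : n < 10
    · rw [Nat.toDigits_of_lt_base h, pvDigitLoop, if_neg (by omega)]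
      simp [pvChrInt_digitChar n h]
    · rw [Nat.toDigits_of_base_le (by omega) (by omega), List.foldl_append,
        ih (n / 10) (Nat.div_lt_self (by omega) (by omega)) c]
      simp only [List.foldl_cons, List.foldl_nil]
      rw [pvChrInt_digitChar (n % 10) (Nat.mod_lt _ (by omega))]
      conv_rhs => rw [pvDigitLoop, if_pos (by omega : n ≥ 10)]
      rw [pvDigitLoop_add]
      push_cast
      ring

theorem foldl_absStr (x : Int) (c : Int) :
    (PySem.Int.toStr |x|).toList.foldl (fun acc ch => acc + pvChrInt ch) c
      = pvDigitLoop x.natAbs c := by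
  rw [PySem.Int.toList_toStr, PySem.Int.toChars,
    if_neg (by simp [not_lt, abs_nonneg])]
  rw [show |x|.toNat = x.natAbs by
    by_cases h : 0 ≤ x
    · rw [abs_of_nonneg h]; omega
    · rw [abs_of_neg (by omega)]; omega]
  exact foldl_toDigits _ _

-- ===== VERDICT (by name: the statement is the Claim_ definition above) =====
theorem check_new_coordinate_spec : Claim_equal_check_new_coordinate := by
  intro in_coor max_val _
  unfold Spec_check_new_coordinate check_new_coordinate check_new_coordinate_alt
  simp only [foldl_absStr]
  split <;> simp_all
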